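-- pv_equiv track=rewrite | github.com/marhs/adventofcode2018 | 6/day6.py | search_points
-- ===== SOURCE A (Python) =====
-- def manhattan_distance(x1, y1, x2, y2):
--     return abs(x1 - x2) + abs(y1 - y2)
--
-- def nearest_point(x, y, initial_points):
--     res = {}
--     for point in initial_points:
--         res[point[2]] = manhattan_distance(x, y, point[0], point[1])
--     distances = sorted(res.values())
--     if distances[0] == distances[1]:
--         return '*'
--     else:
--         return min(res.items(), key=lambda x: x[1])[0]
--
-- def search_points(canvas, initial_points):
--     """
--     * : empate
--     a : perteneciente a A
--     . : no explorado
--     """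
--     total_areas = {k[2]: 0 for k in initial_points}
--     total_areas['*'] = 0
--     for y in range(len(canvas)):
--         for x in range(len(canvas[y])):
--             point_id = nearest_point(x, y, initial_points)
--             canvas[y][x] = point_id
--             total_areas[point_id] += 1
--     return canvas, total_areas
-- ===== SOURCE B (Python) =====
-- def _merge(a, b):
--     # least-value candidate; equal values => ambiguous (label irrelevant then)
--     if a is None:
--         return b
--     if b is None:
--         return a
--     if a[0] < b[0]:
--         return a
--     if b[0] < a[0]:
--         return b
--     return (a[0], a[1], True)
--
--
-- def search_points(canvas, initial_points):
--     """Sweep-line Manhattan-Voronoi labeling: collapse the points by label once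
--     (dict semantics), sort them by x, and per row build prefix minima of
--     |y-py|-px and suffix minima of |y-py|+px; each cell is then labeled in O(1)
--     by merging the two envelope candidates at its split index (a two-pointer
--     sweep), instead of scanning/sorting all points per cell.
--     Mutates canvas in place like the original."""
--     last = {}
--     for px, py, lbl in initial_points:
--         last[lbl] = (px, py)
--     pts = sorted(((px, py, lbl) for lbl, (px, py) in last.items()),
--                  key=lambda p: p[0])
--     n = len(pts)
--     totals = {k[2]: 0 for k in initial_points}
--     totals['*'] = 0
--     for y, row in enumerate(canvas):
--         L = []
--         best = None
--         for px, py, lbl in pts: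
--             best = _merge(best, (abs(y - py) - px, lbl, False))
--             L.append(best)
--         R = []
--         best = None
--         for px, py, lbl in reversed(pts):
--             best = _merge(best, (abs(y - py) + px, lbl, False))
--             R.append(best)
--         R.reverse()
--         k = 0
--         for x in range(len(row)):
--             while k < n and pts[k][0] <= x:
--                 k += 1
--             cand = None
--             if k > 0:
--                 v, lbl, amb = L[k - 1]
--                 cand = (x + v, lbl, amb)
--             if k < n:
--                 v, lbl, amb = R[k]
--                 cand = _merge(cand, (v - x, lbl, amb))
--             label = '*' if cand[2] else cand[1]
--             row[x] = label
--             totals[label] += 1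
--     return canvas, totals
-- ===== Notes on version B (the rewrite author's own statement) =====
-- stated objective: faster
-- what changed: A rebuilds a label-keyed dict and sorts all point distances for EVERY grid cell; B collapses the points by label once, sorts them by x once, and per row precomputes prefix minima of |y-py|-px and suffix minima of |y-py|+px, so each cell is labeled in O(1) by merging two envelope candidates at its two-pointer split index (no per-cell scan over the points at all).
import Mathlib
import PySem

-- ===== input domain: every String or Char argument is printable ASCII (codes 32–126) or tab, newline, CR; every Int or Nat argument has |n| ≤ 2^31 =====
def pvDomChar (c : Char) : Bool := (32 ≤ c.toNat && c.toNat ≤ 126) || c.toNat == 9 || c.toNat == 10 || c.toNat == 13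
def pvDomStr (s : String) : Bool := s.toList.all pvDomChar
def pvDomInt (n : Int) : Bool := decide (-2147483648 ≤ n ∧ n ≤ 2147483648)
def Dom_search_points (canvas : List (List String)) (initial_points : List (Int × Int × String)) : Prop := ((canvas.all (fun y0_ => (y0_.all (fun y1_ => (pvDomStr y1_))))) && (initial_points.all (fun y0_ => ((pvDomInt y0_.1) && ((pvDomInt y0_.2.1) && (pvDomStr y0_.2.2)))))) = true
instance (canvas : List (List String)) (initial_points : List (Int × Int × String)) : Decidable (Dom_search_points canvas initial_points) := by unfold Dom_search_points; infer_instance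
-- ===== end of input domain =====

-- B replaces A's per-cell dict rebuild + sort by a sweep-line Manhattan-Voronoi labeling:
-- dedup points by label once, sort by x once, per row precompute prefix minima of |y-py|-px and
-- suffix minima of |y-py|+px, and label each cell by merging two envelope candidates at its
-- two-pointer split index.  Equivalence is about the RETURN value; both Pythons also mutate
-- `canvas` in place in the same way.

-- ===== PORT A =====
def pv_manhattan (x1 y1 x2 y2 : Int) : Int := |x1 - x2| + |y1 - y2|

-- nearest_point; `none` = the IndexError on distances[0]/distances[1] (fewer than two distinct
-- labels), excluded by Pre_.
def pv_nearest_point (x y : Int) (initial_points : List (Int × Int × String)) : Option String :=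
  let res : PySem.Dict String Int :=
    initial_points.foldl (fun d p => d.insert p.2.2 (pv_manhattan x y p.1 p.2.1)) PySem.Dict.empty
  let distances := PySem.List.sorted res.values (fun v => v)
  match PySem.List.pyGet? distances 0, PySem.List.pyGet? distances 1 with
  | some d0, some d1 =>
      if d0 = d1 then some "*"
      else (PySem.List.min? res.items (fun p => p.2)).map (fun p => p.1)
  | _, _ => none

-- one grid cell of A's double loop; total_areas[pid] += 1 is Dict.modify (pid is always a key,
-- so += never raises KeyError); `.getD "!"` is only reached where Python raised (outside Pre_)
def pvAInner (initial_points : List (Int × Int × String)) (y : Int)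
    (st : List (List String) × PySem.Dict String Int) (x : Int) :
    List (List String) × PySem.Dict String Int :=
  let pid := (pv_nearest_point x y initial_points).getD "!"
  (PySem.List.pySetD st.1 y (PySem.List.pySetD (PySem.List.pyGetD st.1 y []) x pid),
   st.2.modify pid 0 (· + 1))

def pvAOuter (initial_points : List (Int × Int × String))
    (st : List (List String) × PySem.Dict String Int) (y : Int) :
    List (List String) × PySem.Dict String Int :=
  (PySem.List.pyRange 0 ((PySem.List.pyGetD st.1 y []).length : Int)).foldl
    (pvAInner initial_points y) st

def search_points (canvas : List (List String)) (initial_points : List (Int × Int × String)) :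
    List (List String) × (List (String × Int)) :=
  let total_areas : PySem.Dict String Int :=
    (initial_points.foldl (fun d k => d.insert k.2.2 (0 : Int)) PySem.Dict.empty).insert "*" 0
  let res := (PySem.List.pyRange 0 (canvas.length : Int)).foldl
    (pvAOuter initial_points) (canvas, total_areas)
  (res.1, res.2.items)

-- ===== PORT B =====
-- _merge: least-value candidate; equal values => ambiguous
def pv_merge (a b : Option (Int × String × Bool)) : Option (Int × String × Bool) :=
  match a, b with
  | none, b => b
  | some a, none => some a
  | some a, some b =>
      if a.1 < b.1 then some a
      else if b.1 < a.1 then some b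
      else some (a.1, a.2.1, true)

-- `last = {}; for px, py, lbl in initial_points: last[lbl] = (px, py); pts = [...]` —
-- the per-label collapse (last coordinates, first-occurrence order) done once up front
def pv_dedup_points (initial_points : List (Int × Int × String)) : List (Int × Int × String) :=
  ((initial_points.foldl (fun d p => d.insert p.2.2 (p.1, p.2.1)) PySem.Dict.empty).items).map
    (fun q => (q.2.1, q.2.2, q.1))

-- the `best = _merge(best, (g(p), lbl, False)); L.append(best)` scan loop (used for both L and R)
def pv_scan (g : Int × Int × String → Int) (pts : List (Int × Int × String)) :
    Option (Int × String × Bool) × List (Option (Int × String × Bool)) :=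
  pts.foldl (fun st p =>
    let b := pv_merge st.1 (some (g p, p.2.2, false))
    (b, st.2 ++ [b])) (none, [])

-- `while k < n and pts[k][0] <= x: k += 1`
def pv_advance (pts : List (Int × Int × String)) (x : Int) (k : Nat) : Nat :=
  if h : k < pts.length then
    if pts[k].1 ≤ x then pv_advance pts x (k + 1) else k
  else k
termination_by pts.length - k

-- cell body after the while loop; `none` = the TypeError Python raises on `cand[2]` when there
-- are no points at all (outside Pre_)
def pv_cell (n : Nat) (L R : List (Option (Int × String × Bool))) (k : Nat) (x : Int) : String :=
  let cand1 : Option (Int × String × Bool) :=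
    if 0 < k then (L.getD (k - 1) none).map (fun e => (x + e.1, e.2.1, e.2.2)) else none
  let cand2 : Option (Int × String × Bool) :=
    if k < n then pv_merge cand1 ((R.getD k none).map (fun e => (e.1 - x, e.2.1, e.2.2)))
    else cand1
  match cand2 with
  | some c => if c.2.2 then "*" else c.2.1
  | none => "!"

def pvBStep (spts : List (Int × Int × String)) (L R : List (Option (Int × String × Bool)))
    (st : List String × Nat × PySem.Dict String Int) (x : Int) :
    List String × Nat × PySem.Dict String Int :=
  let k := pv_advance spts x st.2.1
  let lbl := pv_cell spts.length L R k x
  (PySem.List.pySetD st.1 x lbl, k, st.2.2.modify lbl 0 (· + 1))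

def pvBRow (spts : List (Int × Int × String))
    (st : List (List String) × PySem.Dict String Int) (yrow : Int × List String) :
    List (List String) × PySem.Dict String Int :=
  let L := (pv_scan (fun p => |yrow.1 - p.2.1| - p.1) spts).2
  let R := ((pv_scan (fun p => |yrow.1 - p.2.1| + p.1) spts.reverse).2).reverse
  let r := (PySem.List.pyRange 0 (yrow.2.length : Int)).foldl (pvBStep spts L R) (yrow.2, 0, st.2)
  (st.1 ++ [r.1], r.2.2)

def search_points_alt (canvas : List (List String)) (initial_points : List (Int × Int × String)) :
    List (List String) × (List (String × Int)) :=
  let spts := PySem.List.sorted (pv_dedup_points initial_points) (fun p => p.1)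
  let total_areas : PySem.Dict String Int :=
    (initial_points.foldl (fun d k => d.insert k.2.2 (0 : Int)) PySem.Dict.empty).insert "*" 0
  let res := (PySem.List.enumerate canvas 0).foldl (pvBRow spts) ([], total_areas)
  (res.1, res.2.items)

-- ===== PRECONDITION & SPEC =====
-- Pre_ excludes exactly the inputs on which A raises IndexError in nearest_point: a grid with at
-- least one cell while the points carry fewer than two distinct labels (sorted distances has no
-- second element to compare).
def Pre_search_points (canvas : List (List String)) (initial_points : List (Int × Int × String)) : Prop :=
  (∀ row ∈ canvas, row = []) ∨
  2 ≤ (PySem.Set.ofList (initial_points.map (fun p => p.2.2))).length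
instance (canvas : List (List String)) (initial_points : List (Int × Int × String)) : Decidable (Pre_search_points canvas initial_points) := by unfold Pre_search_points; infer_instance

def pvWitness_search_points : List (List String) × (List (Int × Int × String)) :=
  ([[".", "."], ["."]], [(0, 0, "a"), (2, 1, "b")])

def Spec_search_points (canvas : List (List String)) (initial_points : List (Int × Int × String)) (out : List (List String) × (List (String × Int))) : Prop := out = search_points_alt canvas initial_points
instance (canvas : List (List String)) (initial_points : List (Int × Int × String)) (out : List (List String) × (List (String × Int))) : Decidable (Spec_search_points canvas initial_points out) := by unfold Spec_search_points; infer_instance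

-- ===== CLAIM (what is proved, stated in full; the proofs are below) =====
def Claim_equal_search_points : Prop := ∀ (canvas : List (List String)) (initial_points : List (Int × Int × String)), Dom_search_points canvas initial_points → Pre_search_points canvas initial_points → Spec_search_points canvas initial_points (search_points canvas initial_points)

-- ===== LEMMAS AND PROOFS =====

-- proof-side characterisation of one cell's label over the deduped points, in dict order:
-- min distance, its multiplicity, first argmin
def pv_label (x y : Int) (initial_points : List (Int × Int × String)) : Option String :=
  let ds := initial_points.map (fun p => |x - p.1| + |y - p.2.1|)
  match PySem.List.min? ds (fun v => v) with
  | none => none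
  | some m =>
      if PySem.List.count ds m > 1 then some "*"
      else match PySem.List.index? ds m with
           | some i => (initial_points[i]?).map (fun p => p.2.2)
           | none => none

theorem pv_foldl_min_stay {α : Type} (f : α → Int) (step : Option α → α → Option α)
    (hstep : ∀ acc x, step acc x = match acc with
      | none => some x
      | some m => if f x < f m then some x else some m) :
    ∀ (t : List α) (c : α), (∀ z ∈ t, f c ≤ f z) →
      t.foldl step (some c) = some c := by
  intro t
  induction t with
  | nil => intro c _; rfl
  | cons z t ih =>
    intro c h
    simp only [List.foldl_cons, hstep]
    rw [if_neg (not_lt.mpr (h z (by simp)))]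
    exact ih c (fun w hw => h w (by simp [hw]))

theorem pv_foldl_min_pre {α : Type} (f : α → Int) (step : Option α → α → Option α)
    (hstep : ∀ acc x, step acc x = match acc with
      | none => some x
      | some m => if f x < f m then some x else some m) (c : α) :
    ∀ (pre : List α), (∀ z ∈ pre, f c < f z) →
      ∀ acc, (acc = none ∨ ∃ c0, acc = some c0 ∧ f c < f c0) →
      (pre.foldl step acc = none ∨ ∃ c0, pre.foldl step acc = some c0 ∧ f c < f c0) := by
  intro pre
  induction pre with
  | nil => intro _ acc h; simpa using h
  | cons z pre ih =>
    intro h acc hacc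
    simp only [List.foldl_cons]
    apply ih (fun w hw => h w (by simp [hw]))
    rw [hstep]
    rcases hacc with rfl | ⟨c0, rfl, hc0⟩
    · exact Or.inr ⟨z, rfl, h z (by simp)⟩
    · by_cases hlt : f z < f c0
      · simp only [if_pos hlt]
        exact Or.inr ⟨z, rfl, h z (by simp)⟩
      · simp only [if_neg hlt]
        exact Or.inr ⟨c0, rfl, hc0⟩

theorem pv_min?_first {α : Type} (f : α → Int) (pre suf : List α) (c : α)
    (hpre : ∀ z ∈ pre, f c < f z) (hsuf : ∀ z ∈ suf, f c ≤ f z) :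
    PySem.List.min? (pre ++ c :: suf) f = some c := by
  show List.foldl (fun acc x => match acc with
      | none => some x
      | some m => if f x < f m then some x else some m) none (pre ++ c :: suf) = some c
  rw [List.foldl_append, List.foldl_cons]
  rcases pv_foldl_min_pre f _ (fun _ _ => rfl) c pre hpre none (Or.inl rfl) with hn | ⟨c0, he, hc0⟩
  · rw [hn]
    exact pv_foldl_min_stay f _ (fun _ _ => rfl) suf c hsuf
  · rw [he]
    show List.foldl (fun acc x => match acc with
        | none => some x
        | some m => if f x < f m then some x else some m)
        (if f c < f c0 then some c else some c0) suf = some c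
    rw [if_pos hc0]
    exact pv_foldl_min_stay f _ (fun _ _ => rfl) suf c hsuf

theorem pv_getD_mid (done rs : List (List String)) (row : List String) :
    PySem.List.pyGetD (done ++ row :: rs) (done.length : Int) [] = row := by
  rw [PySem.List.pyGetD_natCast]
  simp [List.getD_eq_getElem?_getD]
theorem pv_setD_mid (done rs : List (List String)) (row v : List String) :
    PySem.List.pySetD (done ++ row :: rs) (done.length : Int) v = done ++ v :: rs := by
  rw [PySem.List.pySetD_natCast, List.set_append]
  simp

theorem pv_foldl_insert_map {β κ γ ν : Type} [BEq κ] (k : β → κ)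
    (c : β → γ) (g : γ → ν) :
    ∀ (l : List β) (d2 : PySem.Dict κ γ) (d1 : PySem.Dict κ ν),
      d1.items = d2.items.map (fun q => (q.1, g q.2)) →
      (l.foldl (fun d p => d.insert (k p) (g (c p))) d1).items
        = (l.foldl (fun d p => d.insert (k p) (c p)) d2).items.map (fun q => (q.1, g q.2)) := by
  intro l
  induction l with
  | nil => intro d2 d1 h; simpa using h
  | cons p l ih =>
    intro d2 d1 h
    simp only [List.foldl_cons]
    apply ih
    have hcont : d1.contains (k p) = d2.contains (k p) := by
      simp only [PySem.Dict.contains, h, List.any_map]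
      congr 1
    rw [PySem.Dict.items_insert, PySem.Dict.items_insert, hcont, h]
    by_cases hc : d2.contains (k p) = true
    · simp only [hc, if_true, List.map_map]
      apply List.map_congr_left
      intro q _
      by_cases hq : q.1 == k p
      · simp [Function.comp, hq]
      · simp [Function.comp, hq]
    · simp [hc]

-- the label dedup really has one point per distinct label
theorem pv_dedup_length (pts : List (Int × Int × String)) :
    (pv_dedup_points pts).length
      = (PySem.Set.ofList (pts.map (fun p => p.2.2))).length := by
  unfold pv_dedup_points
  rw [List.length_map]
  have h1 : (pts.foldl (fun d p => d.insert p.2.2 (p.1, p.2.1)) PySem.Dict.empty).items.length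
      = (pts.foldl (fun d p => d.insert p.2.2 (p.1, p.2.1)) PySem.Dict.empty).keys.length := by
    simp [PySem.Dict.keys]
  rw [h1, PySem.Dict.keys_foldl_insert_key pts (fun p => p.2.2)
        (fun _ p => (p.1, p.2.1)) PySem.Dict.empty]
  simp [PySem.Dict.empty, PySem.Dict.keys, PySem.Set.update_nil_left]

-- A's per-cell result = pv_label over the deduped points (needs ≥ 2 distinct labels)
theorem search_points_cell_eq (pts : List (Int × Int × String))
    (h2 : 2 ≤ (PySem.Set.ofList (pts.map (fun p => p.2.2))).length) (x y : Int) :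
    pv_nearest_point x y pts = pv_label x y (pv_dedup_points pts) := by
  simp only [pv_nearest_point, pv_label, pv_manhattan, pv_dedup_points]
  have hmapped := pv_foldl_insert_map (fun p : Int × Int × String => p.2.2)
    (fun p : Int × Int × String => (p.1, p.2.1))
    (fun cc : Int × Int => |x - cc.1| + |y - cc.2|) pts PySem.Dict.empty PySem.Dict.empty
    (by simp [PySem.Dict.empty])
  set D := pts.foldl (fun d p => d.insert p.2.2 (p.1, p.2.1)) PySem.Dict.empty with hD
  set pts2 : List (Int × Int × String) := D.items.map (fun q => (q.2.1, q.2.2, q.1)) with hpts2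
  have hitems : (List.foldl (fun d p => d.insert p.2.2 (|x - p.1| + |y - p.2.1|))
        PySem.Dict.empty pts).items
      = pts2.map (fun p => (p.2.2, |x - p.1| + |y - p.2.1|)) := by
    rw [hpts2, List.map_map]
    simpa using hmapped
  have hvalues : (List.foldl (fun d p => d.insert p.2.2 (|x - p.1| + |y - p.2.1|))
        PySem.Dict.empty pts).values
      = pts2.map (fun p => |x - p.1| + |y - p.2.1|) := by
    simp [PySem.Dict.values, hitems, Function.comp]
  rw [hvalues, hitems]
  have hkeys : D.keys = PySem.Set.ofList (pts.map (fun p => p.2.2)) := by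
    rw [hD, PySem.Dict.keys_foldl_insert_key pts (fun p => p.2.2)
          (fun _ p => (p.1, p.2.1)) PySem.Dict.empty]
    simp [PySem.Dict.empty, PySem.Dict.keys, PySem.Set.update_nil_left]
  have h22 : 2 ≤ pts2.length := by
    have hl : pts2.length = D.keys.length := by simp [hpts2, PySem.Dict.keys]
    rw [hl, hkeys]; exact h2
  set F : Int × Int × String → Int := fun p => |x - p.1| + |y - p.2.1| with hF
  set ds := pts2.map F with hds
  have hlends : ds.length = pts2.length := by simp [hds]
  have hlen : (PySem.List.sorted ds (fun v => v)).length = pts2.length := by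
    rw [PySem.List.length_sorted, hlends]
  have hperm : (PySem.List.sorted ds (fun v => v)).Perm ds := PySem.List.sorted_perm ds (fun v => v) false
  rcases hs : PySem.List.sorted ds (fun v => v) with _ | ⟨a, _ | ⟨b, t⟩⟩
  · rw [hs] at hlen; simp at hlen; omega
  · rw [hs] at hlen; simp at hlen; omega
  rw [hs] at hperm
  have hget0 : PySem.List.pyGet? (a :: b :: t) (0 : Int) = some a := by
    rw [show (0 : Int) = ((0 : Nat) : Int) from rfl, PySem.List.pyGet?_natCast]; rfl
  have hget1 : PySem.List.pyGet? (a :: b :: t) (1 : Int) = some b := by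
    rw [show (1 : Int) = ((1 : Nat) : Int) from rfl, PySem.List.pyGet?_natCast]; rfl
  rw [hget0, hget1]
  have ha_mem : a ∈ ds := hperm.subset (by simp)
  have hmin_a : ∀ z ∈ ds, a ≤ z := by
    intro z hz
    exact PySem.List.key_head_sorted_le ds (fun v => v) hs z hz
  obtain ⟨m, hm⟩ : ∃ m, PySem.List.min? ds (fun v => v) = some m := by
    cases hmm : PySem.List.min? ds (fun v => v) with
    | none =>
      rw [PySem.List.min?_eq_none_iff] at hmm
      rw [hmm] at hlends; simp at hlends; omega
    | some m => exact ⟨m, rfl⟩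
  have hma : m = a :=
    le_antisymm (PySem.List.min?_isMin hm a ha_mem) (hmin_a m (PySem.List.min?_mem hm))
  subst hma
  rw [hm]
  dsimp only
  have hcnt : List.count m ds = List.count m (m :: b :: t) := (hperm.count_eq m).symm
  by_cases hab : m = b
  · have hc2 : PySem.List.count ds m > 1 := by
      rw [PySem.List.count_eq, hcnt, ← hab]
      simp
    rw [if_pos hab, if_pos hc2]
  · rw [if_neg hab]
    have hpw := PySem.List.sorted_pairwise ds (fun v => v)
    rw [hs] at hpw
    have hnotmem : m ∉ b :: t := by
      intro hmem
      rcases List.mem_cons.mp hmem with h1 | h2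
      · exact hab h1
      · have h1 : m ≤ b := (List.pairwise_cons.mp hpw).1 b (by simp)
        have h3 : b ≤ m := ((List.pairwise_cons.mp (List.pairwise_cons.mp hpw).2).1) m h2
        exact hab (le_antisymm h1 h3)
    have hc1 : PySem.List.count ds m = 1 := by
      rw [PySem.List.count_eq, hcnt]
      simp [List.count_eq_zero.mpr hnotmem]
    rw [hc1]
    simp only [gt_iff_lt, lt_irrefl, if_false]
    obtain ⟨k, hk⟩ : ∃ k, PySem.List.index? ds m = some k := by
      cases hkk : PySem.List.index? ds m with
      | none =>
        have := (PySem.List.index?_isSome_iff ds m).mpr ha_mem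
        rw [hkk] at this; simp at this
      | some k => exact ⟨k, rfl⟩
    obtain ⟨preds, sufds, hsplit, hklen, hnotpre⟩ := (PySem.List.index?_eq_some_iff ds m k).mp hk
    rw [hds] at hsplit
    obtain ⟨l1, l2, hptsd, hmap1, hmap2⟩ := List.map_eq_append_iff.mp hsplit
    obtain ⟨cp, l2', hl2, hcp, hmap2'⟩ := List.map_eq_cons_iff.mp hmap2
    subst hl2
    have hl1len : l1.length = k := by rw [← hklen, ← hmap1]; simp
    have hA : PySem.List.min? (pts2.map (fun p => (p.2.2, F p))) (fun p => p.2)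
        = some (cp.2.2, F cp) := by
      rw [hptsd]
      rw [show (l1 ++ cp :: l2').map (fun p => (p.2.2, F p))
            = l1.map (fun p => (p.2.2, F p)) ++ (cp.2.2, F cp) :: l2'.map (fun p => (p.2.2, F p)) from by simp]
      apply pv_min?_first
      · intro z hz
        obtain ⟨w, hw, rfl⟩ := List.mem_map.mp hz
        have h1 : F w ∈ preds := by rw [← hmap1]; exact List.mem_map_of_mem hw
        have h2 : m ≤ F w := hmin_a (F w) (by rw [hds, hptsd]; exact List.mem_map_of_mem (by simp [hw]))
        have h3 : F w ≠ m := fun he => hnotpre (he ▸ h1)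
        simp only [hcp]
        omega
      · intro z hz
        obtain ⟨w, hw, rfl⟩ := List.mem_map.mp hz
        have h2 : m ≤ F w := hmin_a (F w) (by rw [hds, hptsd]; exact List.mem_map_of_mem (by simp [hw]))
        simp only [hcp]
        omega
    rw [hA, hk]
    have hB : pts2[k]? = some cp := by
      rw [hptsd, ← hl1len]
      simp
    simp [hB]

def pvSum (l : List (Int × String)) : Option (Int × String × Bool) :=
  l.foldl (fun a e => pv_merge a (some (e.1, e.2, false))) none

theorem pv_merge_none_right (a : Option (Int × String × Bool)) : pv_merge a none = a := by
  cases a <;> rfl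

theorem pv_merge_assoc (a b c : Option (Int × String × Bool)) :
    pv_merge (pv_merge a b) c = pv_merge a (pv_merge b c) := by
  rcases a with _ | ⟨va, la, aa⟩ <;> rcases b with _ | ⟨vb, lb, ab⟩ <;> rcases c with _ | ⟨vc, lc, ac⟩ <;>
    try rfl
  · simp only [pv_merge]; split_ifs <;> rfl
  · simp only [pv_merge]
    split_ifs <;> dsimp only <;> (try split_ifs) <;> first | rfl | omega

theorem pv_foldl_merge_shift :
    ∀ (l : List (Int × String)) (s : Option (Int × String × Bool)),
      l.foldl (fun a e => pv_merge a (some (e.1, e.2, false))) s = pv_merge s (pvSum l) := by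
  intro l
  induction l with
  | nil => intro s; simp [pvSum, pv_merge_none_right]
  | cons e t ih =>
    intro s
    have h1 : pvSum (e :: t) = pv_merge (some (e.1, e.2, false)) (pvSum t) := by
      simp only [pvSum, List.foldl_cons]
      rw [ih]
      rfl
    simp only [List.foldl_cons]
    rw [ih, h1, pv_merge_assoc]

theorem pvSum_cons (e : Int × String) (t : List (Int × String)) :
    pvSum (e :: t) = pv_merge (some (e.1, e.2, false)) (pvSum t) := by
  simp only [pvSum, List.foldl_cons]
  rw [pv_foldl_merge_shift]
  rfl

theorem pvSum_append (l1 l2 : List (Int × String)) :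
    pvSum (l1 ++ l2) = pv_merge (pvSum l1) (pvSum l2) := by
  simp only [pvSum, List.foldl_append]
  rw [pv_foldl_merge_shift]
  rfl

theorem pvSum_eq_none (l : List (Int × String)) : pvSum l = none ↔ l = [] := by
  cases l with
  | nil => simp [pvSum]
  | cons e t =>
    rw [pvSum_cons]
    cases h : pvSum t <;> simp [pv_merge] <;> split_ifs <;> simp

theorem pvSum_char :
    ∀ (l : List (Int × String)) (m : Int) (lbl : String) (amb : Bool),
      pvSum l = some (m, lbl, amb) →
      (m, lbl) ∈ l ∧ (∀ e ∈ l, m ≤ e.1) ∧ (amb = true ↔ 1 < (l.map Prod.fst).count m) := by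
  intro l
  induction l with
  | nil => intro m lbl amb h; simp [pvSum] at h
  | cons e t ih =>
    intro m lbl amb h
    rw [pvSum_cons] at h
    cases ht : pvSum t with
    | none =>
      rw [ht, pv_merge_none_right] at h
      obtain rfl : e = (m, lbl) := by cases e; simp_all
      obtain rfl : amb = false := by simp_all
      rw [(pvSum_eq_none t).mp ht]
      simp
    | some s =>
      obtain ⟨m2, l2, a2⟩ := s
      obtain ⟨hmem2, hbd2, hamb2⟩ := ih m2 l2 a2 ht
      rw [ht] at h
      simp only [pv_merge] at h
      have hm2mem : m2 ∈ t.map Prod.fst := List.mem_map.mpr ⟨(m2, l2), hmem2, rfl⟩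
      split_ifs at h with h1 h2
      · -- e.1 < m2
        obtain ⟨rfl, rfl, rfl⟩ : e.1 = m ∧ e.2 = lbl ∧ false = amb := by simp_all
        have hcnt : (t.map Prod.fst).count e.1 = 0 := by
          rw [List.count_eq_zero]
          intro hmem
          obtain ⟨w, hw, hwe⟩ := List.mem_map.mp hmem
          have := hbd2 w hw
          omega
        refine ⟨by simp, ?_, ?_⟩
        · intro f hf
          rcases List.mem_cons.mp hf with rfl | hf
          · exact le_refl _
          · exact le_trans (le_of_lt h1) (hbd2 f hf)
        · simp [List.count_cons, hcnt]
      · -- m2 < e.1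
        obtain ⟨rfl, rfl, rfl⟩ : m2 = m ∧ l2 = lbl ∧ a2 = amb := by simp_all
        refine ⟨by simp [hmem2], ?_, ?_⟩
        · intro f hf
          rcases List.mem_cons.mp hf with rfl | hf
          · exact le_of_lt h2
          · exact hbd2 f hf
        · rw [List.map_cons, List.count_cons]
          rw [if_neg (by simp; omega)]
          simpa using hamb2
      · -- values equal
        have heq : e.1 = m2 := le_antisymm (not_lt.mp h2) (not_lt.mp h1)
        obtain ⟨rfl, rfl, rfl⟩ : e.1 = m ∧ e.2 = lbl ∧ true = amb := by simp_all
        refine ⟨by simp, ?_, ?_⟩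
        · intro f hf
          rcases List.mem_cons.mp hf with rfl | hf
          · exact le_refl _
          · exact heq ▸ hbd2 f hf
        · have hcnt : 1 ≤ (t.map Prod.fst).count e.1 := by
            rw [heq]; exact List.one_le_count_iff.mpr hm2mem
          have hc : List.count e.1 (List.map Prod.fst (e :: t))
              = List.count e.1 (List.map Prod.fst t) + 1 := by
            simp [List.count_cons]
          rw [hc]
          constructor
          · intro _; omega
          · intro _; rfl

theorem pvSum_shift (c : Int) (l : List (Int × String)) :
    (pvSum l).map (fun e => (c + e.1, e.2.1, e.2.2))
      = pvSum (l.map (fun e => (c + e.1, e.2))) := by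
  induction l with
  | nil => rfl
  | cons e t ih =>
    rw [List.map_cons, pvSum_cons, pvSum_cons, ← ih]
    cases ht : pvSum t with
    | none => rfl
    | some s =>
      obtain ⟨m2, l2, a2⟩ := s
      simp only [pv_merge, Option.map_some]
      split_ifs <;> first | rfl | omega

theorem pv_scan_go (g : Int × Int × String → Int) :
    ∀ (l : List (Int × Int × String)) (s0 : Option (Int × String × Bool))
      (acc : List (Option (Int × String × Bool))),
      l.foldl (fun st p =>
          let b := pv_merge st.1 (some (g p, p.2.2, false))
          (b, st.2 ++ [b])) (s0, acc)
        = (l.foldl (fun a p => pv_merge a (some (g p, p.2.2, false))) s0,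
           acc ++ (List.range l.length).map
             (fun j => (l.take (j + 1)).foldl
                (fun a p => pv_merge a (some (g p, p.2.2, false))) s0)) := by
  intro l
  induction l with
  | nil => intro s0 acc; simp
  | cons p t ih =>
    intro s0 acc
    simp only [List.foldl_cons]
    rw [ih]
    congr 1
    rw [show (p :: t).length = t.length + 1 from rfl, List.range_succ_eq_map, List.map_cons,
        List.map_map]
    simp only [List.take_succ_cons, List.foldl_cons, List.take_zero, List.foldl_nil]
    rw [List.append_cons]
    simp [Function.comp]

theorem pv_scan_spec (g : Int × Int × String → Int) (l : List (Int × Int × String)) :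
    (pv_scan g l).2
      = (List.range l.length).map
          (fun j => pvSum ((l.take (j + 1)).map (fun p => (g p, p.2.2)))) := by
  unfold pv_scan
  rw [pv_scan_go]
  simp only [List.nil_append]
  apply List.map_congr_left
  intro j _
  simp [pvSum, ← List.map_take, List.foldl_map]

theorem pv_advance_spec (pts : List (Int × Int × String)) (x : Int) :
    ∀ k, k ≤ pts.length →
      k ≤ pv_advance pts x k ∧ pv_advance pts x k ≤ pts.length ∧
      (∀ i (h : i < pts.length), k ≤ i → i < pv_advance pts x k → pts[i].1 ≤ x) ∧
      (∀ h : pv_advance pts x k < pts.length, x < pts[pv_advance pts x k].1) := by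
  intro k
  induction hfuel : pts.length - k generalizing k with
  | zero =>
    intro hk
    have hkl : k = pts.length := by omega
    rw [pv_advance, dif_neg (by omega)]
    refine ⟨le_refl _, hk, fun i h h1 h2 => by omega, fun h => by omega⟩
  | succ n ih =>
    intro hk
    have hlt : k < pts.length := by omega
    rw [pv_advance, dif_pos hlt]
    by_cases hle : pts[k].1 ≤ x
    · rw [if_pos hle]
      obtain ⟨ha, hb, hc, hd⟩ := ih (k + 1) (by omega) (by omega)
      refine ⟨by omega, hb, ?_, hd⟩
      intro i h h1 h2
      rcases Nat.eq_or_lt_of_le h1 with rfl | h1'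
      · exact hle
      · exact hc i h (by omega) h2
    · rw [if_neg hle]
      exact ⟨le_refl _, le_of_lt hlt, fun i h h1 h2 => by omega, fun h => by omega⟩

theorem pv_cell_eq (pts2 : List (Int × Int × String)) (hne : pts2 ≠ []) (y x : Int) (k : Nat)
    (hk : k ≤ (PySem.List.sorted pts2 (fun p => p.1)).length)
    (hkx : ∀ i (h : i < (PySem.List.sorted pts2 (fun p => p.1)).length), i < k →
        (PySem.List.sorted pts2 (fun p => p.1))[i].1 ≤ x)
    (hko : ∀ h : k < (PySem.List.sorted pts2 (fun p => p.1)).length,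
        x < (PySem.List.sorted pts2 (fun p => p.1))[k].1) :
    pv_cell (PySem.List.sorted pts2 (fun p => p.1)).length
        (pv_scan (fun p => |y - p.2.1| - p.1) (PySem.List.sorted pts2 (fun p => p.1))).2
        ((pv_scan (fun p => |y - p.2.1| + p.1) (PySem.List.sorted pts2 (fun p => p.1)).reverse).2).reverse
        k x
      = (pv_label x y pts2).getD "!" := by
  set spts := PySem.List.sorted pts2 (fun p => p.1) with hspts
  set n := spts.length with hn
  set F : Int × Int × String → Int := fun p => |x - p.1| + |y - p.2.1| with hF
  set eF : Int × Int × String → Int × String := fun p => (F p, p.2.2) with heF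
  have hperm : spts.Perm pts2 := PySem.List.sorted_perm pts2 (fun p => p.1) false
  have hpw : spts.Pairwise (fun a b => a.1 ≤ b.1) := PySem.List.sorted_pairwise pts2 (fun p => p.1)
  have hlen2 : n = pts2.length := by rw [hn, hspts, PySem.List.length_sorted]
  -- the left candidate is the summary of the prefix distances
  have hC1 : (if 0 < k then
        (((pv_scan (fun p => |y - p.2.1| - p.1) spts).2).getD (k - 1) none).map
          (fun e => (x + e.1, e.2.1, e.2.2))
      else none) = pvSum ((spts.take k).map eF) := by
    rcases Nat.eq_zero_or_pos k with rfl | hkpos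
    · simp [pvSum]
    · rw [if_pos hkpos, pv_scan_spec]
      have hgetD : ((List.range n).map
            (fun j => pvSum ((spts.take (j + 1)).map (fun p => (|y - p.2.1| - p.1, p.2.2))))).getD
            (k - 1) none
          = pvSum ((spts.take k).map (fun p => (|y - p.2.1| - p.1, p.2.2))) := by
        rw [List.getD_eq_getElem?_getD, List.getElem?_map,
            List.getElem?_range (show k - 1 < n by omega)]
        simp only [Option.map_some, Option.getD_some,
          show k - 1 + 1 = k from by omega]
      rw [hgetD, pvSum_shift]
      congr 1
      rw [List.map_map]
      apply List.map_congr_left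
      intro p hp
      obtain ⟨i, hi, rfl⟩ := List.mem_iff_getElem.mp hp
      have hilt : i < k := by
        have := hi; rw [List.length_take] at this; omega
      have hin : i < n := by
        have := hi; rw [List.length_take] at this; omega
      rw [List.getElem_take]
      have hle : (spts[i].1 : Int) ≤ x := hkx i hin hilt
      simp only [heF, hF, Function.comp]
      have habs : |x - spts[i].1| = x - spts[i].1 := abs_of_nonneg (by omega)
      rw [habs]
      refine Prod.ext ?_ rfl
      simp
      omega
  -- the right candidate is the summary of the suffix distances
  have hC2 : ∀ hkn : k < n,
      (((pv_scan (fun p => |y - p.2.1| + p.1) spts.reverse).2).reverse.getD k none).map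
          (fun e => (e.1 - x, e.2.1, e.2.2))
        = pvSum (((spts.drop k).reverse).map eF) := by
    intro hkn
    rw [pv_scan_spec]
    have hlenrev : spts.reverse.length = n := by simp [hn]
    have hmaplen : ((List.range spts.reverse.length).map
        (fun j => pvSum ((spts.reverse.take (j + 1)).map (fun p => (|y - p.2.1| + p.1, p.2.2))))).length = n := by
      simp [hlenrev]
    have hgetD : (((List.range spts.reverse.length).map
          (fun j => pvSum ((spts.reverse.take (j + 1)).map (fun p => (|y - p.2.1| + p.1, p.2.2))))).reverse).getD k none
        = pvSum ((spts.reverse.take (n - k)).map (fun p => (|y - p.2.1| + p.1, p.2.2))) := by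
      rw [List.getD_eq_getElem?_getD, List.getElem?_reverse (by rw [hmaplen]; exact hkn)]
      rw [hmaplen, List.getElem?_map,
          List.getElem?_range (show n - 1 - k < spts.reverse.length by rw [hlenrev]; omega)]
      simp only [Option.map_some, Option.getD_some,
        show n - 1 - k + 1 = n - k from by omega]
    rw [hgetD]
    have htd : spts.reverse.take (n - k) = (spts.drop k).reverse := by
      rw [List.reverse_drop]   -- hope: (l.drop k).reverse = l.reverse.take (l.length - k)
    rw [htd]
    rw [show (fun e : Int × String × Bool => (e.1 - x, e.2.1, e.2.2))
          = (fun e : Int × String × Bool => (-x + e.1, e.2.1, e.2.2)) from by funext e; simp; omega]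
    rw [pvSum_shift]
    congr 1
    rw [List.map_map]
    apply List.map_congr_left
    intro p hp
    have hpd : p ∈ spts.drop k := List.mem_reverse.mp hp
    obtain ⟨i, hi, rfl⟩ := List.mem_iff_getElem.mp hpd
    have hin : k + i < n := by
      have := hi; rw [List.length_drop] at this; omega
    rw [List.getElem_drop]
    have hgt : x < (spts[k + i].1 : Int) := by
      rcases Nat.eq_zero_or_pos i with rfl | hipos
      · simpa using hko hkn
      · have h1 : x < spts[k].1 := hko hkn
        have h2 : spts[k].1 ≤ spts[k + i].1 :=
          List.pairwise_iff_getElem.mp hpw k (k + i) hkn hin (by omega)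
        omega
    simp only [heF, hF, Function.comp]
    have habs : |x - spts[k+i].1| = -(x - spts[k+i].1) := abs_of_nonpos (by omega)
    rw [habs]
    refine Prod.ext ?_ rfl
    simp
    omega
  -- assemble
  have hn1 : 1 ≤ n := by
    have : pts2.length ≠ 0 := fun h0 => hne (List.eq_nil_of_length_eq_zero h0)
    omega
  set E : List (Int × String) := (spts.take k ++ (spts.drop k).reverse).map eF with hE
  have hElen : E.length = n := by
    rw [hE, List.length_map, List.length_append, List.length_reverse, List.length_take,
        List.length_drop]
    omega
  have hEsplit : pvSum E
      = pv_merge (pvSum ((spts.take k).map eF)) (pvSum (((spts.drop k).reverse).map eF)) := by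
    rw [hE, List.map_append, pvSum_append]
  have hpermE : E.Perm (pts2.map eF) := by
    apply List.Perm.map
    exact ((List.Perm.append_left _ (List.reverse_perm _)).trans
      (by rw [List.take_append_drop])).trans hperm
  set ds : List Int := pts2.map F with hds
  have hdsE : (E.map Prod.fst).Perm ds := by
    have h1 := hpermE.map Prod.fst
    rw [List.map_map, List.map_map] at h1
    simpa only [hE, hds, List.map_map, show Prod.fst ∘ eF = F from rfl] using h1
  obtain ⟨c, hc⟩ : ∃ c, pvSum E = some c := by
    cases hv : pvSum E with
    | none =>
      rw [pvSum_eq_none] at hv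
      rw [hv] at hElen
      simp at hElen
      omega
    | some c => exact ⟨c, rfl⟩
  obtain ⟨m, lbl, amb⟩ := c
  obtain ⟨hmem, hbd, hamb⟩ := pvSum_char E m lbl amb hc
  -- the left side computes out of pvSum E
  have hL : pv_cell n (pv_scan (fun p => |y - p.2.1| - p.1) spts).2
      ((pv_scan (fun p => |y - p.2.1| + p.1) spts.reverse).2).reverse k x
      = (if amb then "*" else lbl) := by
    simp only [pv_cell]
    by_cases hkn : k < n
    · rw [if_pos hkn, hC1, hC2 hkn, ← hEsplit, hc]
    · rw [if_neg hkn, hC1]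
      have hdk : spts.drop k = [] := List.drop_eq_nil_of_le (by omega)
      have : pvSum ((spts.take k).map eF) = some (m, lbl, amb) := by
        rw [← hc, hE, hdk]
        simp
      rw [this]
  rw [hL]
  -- the right side: pv_label
  have hdsne : ds ≠ [] := by
    intro h0
    rw [hds] at h0
    simp at h0
    rw [h0] at hne
    exact hne rfl
  obtain ⟨m0, hm0⟩ : ∃ m0, PySem.List.min? ds (fun v => v) = some m0 := by
    cases hmm : PySem.List.min? ds (fun v => v) with
    | none => exact absurd ((PySem.List.min?_eq_none_iff ds (fun v => v)).mp hmm) hdsne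
    | some m0 => exact ⟨m0, rfl⟩
  have hmE : m ∈ E.map Prod.fst := List.mem_map.mpr ⟨(m, lbl), hmem, rfl⟩
  have hm_eq : m0 = m := by
    have h1 : m0 ≤ m := PySem.List.min?_isMin hm0 m (hdsE.subset hmE)
    have h2 : m ≤ m0 := by
      have hm0ds : m0 ∈ ds := PySem.List.min?_mem hm0
      obtain ⟨e, he, rfl⟩ := List.mem_map.mp (hdsE.symm.subset hm0ds)
      exact hbd e he
    omega
  have hPL : pv_label x y pts2
      = (if PySem.List.count ds m > 1 then some "*"
         else match PySem.List.index? ds m with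
              | some i => (pts2[i]?).map (fun p => p.2.2)
              | none => none) := by
    simp only [pv_label]
    rw [show pts2.map (fun p => |x - p.1| + |y - p.2.1|) = ds from by rw [hds]]
    rw [hm0, hm_eq]
  rw [hPL]
  have hcnt_eq : List.count m ds = List.count m (E.map Prod.fst) := (hdsE.count_eq m).symm
  by_cases hgt : 1 < List.count m (E.map Prod.fst)
  · have : PySem.List.count ds m > 1 := by
      rw [PySem.List.count_eq, hcnt_eq]
      exact hgt
    rw [if_pos this]
    rw [hamb.mpr hgt]
    rfl
  · have hamb' : amb = false := by
      cases amb with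
      | false => rfl
      | true => exact absurd (hamb.mp rfl) hgt
    have hcnt1 : List.count m ds = 1 := by
      have hmds : m ∈ ds := hdsE.subset hmE
      have := List.one_le_count_iff.mpr hmds
      omega
    have hcgt : ¬ PySem.List.count ds m > 1 := by
      rw [PySem.List.count_eq, hcnt1]
      omega
    rw [if_neg hcgt, hamb']
    obtain ⟨i, hi⟩ : ∃ i, PySem.List.index? ds m = some i := by
      cases hkk : PySem.List.index? ds m with
      | none =>
        have := (PySem.List.index?_isSome_iff ds m).mpr (hdsE.subset hmE)
        rw [hkk] at this; simp at this
      | some i => exact ⟨i, rfl⟩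
    rw [hi]
    obtain ⟨pre, suf, hsplitds, hprelen, hnotpre⟩ := (PySem.List.index?_eq_some_iff ds m i).mp hi
    have hnotsuf : m ∉ suf := by
      intro hmem'
      have : 2 ≤ List.count m ds := by
        rw [hsplitds, List.count_append, List.count_cons]
        have h1 := List.one_le_count_iff.mpr hmem'
        simp
        omega
      omega
    -- the unique entry of value m
    obtain ⟨q, hq, hqfst⟩ := List.mem_map.mp (hdsE.subset hmE)
    obtain ⟨w, hw, hweq⟩ := List.mem_map.mp (hpermE.subset hmem)
    -- w ∈ pts2 with eF w = (m, lbl)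
    obtain ⟨j, hj, rfl⟩ := List.mem_iff_getElem.mp hw
    have hjds : j < ds.length := by rw [hds, List.length_map]; exact hj
    have hdsj? : ds[j]? = some m := by
      rw [hds, List.getElem?_map, List.getElem?_eq_getElem hj]
      simp only [Option.map_some, Option.some.injEq]
      have := congrArg Prod.fst hweq
      simpa [heF] using this
    have hilen : i < ds.length := by
      rw [hsplitds, List.length_append, List.length_cons]
      omega
    have hji : j = i := by
      by_contra hji
      rw [hsplitds] at hdsj?
      rcases Nat.lt_or_ge j i with hlt | hge
      · apply hnotpre
        rw [List.getElem?_append_left (by omega)] at hdsj?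
        exact List.mem_of_getElem? hdsj?
      · have hgt' : i < j := by omega
        apply hnotsuf
        rw [List.getElem?_append_right (by omega)] at hdsj?
        rw [hprelen] at hdsj?
        rw [show j - i = (j - i - 1) + 1 from by omega, List.getElem?_cons_succ] at hdsj?
        exact List.mem_of_getElem? hdsj?
    subst hji
    have hsnd : (pts2[j]'hj).2.2 = lbl := by
      have := congrArg Prod.snd hweq
      simpa [heF] using this
    simp [List.getElem?_eq_getElem hj, hsnd]

-- ---------- plumbing ----------
theorem search_points_inner_eq (pts pts2 : List (Int × Int × String)) (hne : pts2 ≠ [])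
    (hc : ∀ x y, pv_nearest_point x y pts = pv_label x y pts2)
    (done rs : List (List String)) :
    ∀ (cnt : Nat) (a : Int) (row : List String) (k : Nat) (d : PySem.Dict String Int),
      k ≤ (PySem.List.sorted pts2 (fun p => p.1)).length →
      (∀ i (h : i < (PySem.List.sorted pts2 (fun p => p.1)).length), i < k →
          (PySem.List.sorted pts2 (fun p => p.1))[i].1 < a) →
      (PySem.List.pyRange a (a + cnt)).foldl (pvAInner pts (done.length : Int)) (done ++ row :: rs, d)
        = ((fun r => (done ++ r.1 :: rs, r.2.2))
            ((PySem.List.pyRange a (a + cnt)).foldl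
              (pvBStep (PySem.List.sorted pts2 (fun p => p.1))
                (pv_scan (fun p => |(done.length : Int) - p.2.1| - p.1) (PySem.List.sorted pts2 (fun p => p.1))).2
                ((pv_scan (fun p => |(done.length : Int) - p.2.1| + p.1) (PySem.List.sorted pts2 (fun p => p.1)).reverse).2).reverse)
              (row, k, d))) := by
  intro cnt
  induction cnt with
  | zero =>
    intro a row k d hk hinv
    rw [show a + (0 : Nat) = a from by omega, PySem.List.pyRange_one_eq_nil (by omega)]
    rfl
  | succ cnt ih =>
    intro a row k d hk hinv
    rw [PySem.List.pyRange_one_cons (by omega)]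
    simp only [List.foldl_cons]
    set spts := PySem.List.sorted pts2 (fun p => p.1) with hspts
    obtain ⟨h1, h2, h3, h4⟩ := pv_advance_spec spts a k hk
    set k' := pv_advance spts a k with hk'
    have hall : ∀ i (h : i < spts.length), i < k' → spts[i].1 ≤ a := by
      intro i h hik
      rcases Nat.lt_or_ge i k with hik2 | hik2
      · exact le_of_lt (hinv i h hik2)
      · exact h3 i h hik2 hik
    have hcell := pv_cell_eq pts2 hne (done.length : Int) a k' h2 hall h4
    have hlbl : pv_cell spts.length
        (pv_scan (fun p => |(done.length : Int) - p.2.1| - p.1) spts).2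
        ((pv_scan (fun p => |(done.length : Int) - p.2.1| + p.1) spts.reverse).2).reverse k' a
        = (pv_nearest_point a (done.length : Int) pts).getD "!" := by
      rw [hcell, hc a (done.length : Int)]
    have hstepA : pvAInner pts (done.length : Int) (done ++ row :: rs, d) a
        = (done ++ (PySem.List.pySetD row a ((pv_nearest_point a (done.length : Int) pts).getD "!")) :: rs,
           d.modify ((pv_nearest_point a (done.length : Int) pts).getD "!") 0 (· + 1)) := by
      simp only [pvAInner, pv_getD_mid, pv_setD_mid]
    have hstepB : pvBStep spts
        (pv_scan (fun p => |(done.length : Int) - p.2.1| - p.1) spts).2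
        ((pv_scan (fun p => |(done.length : Int) - p.2.1| + p.1) spts.reverse).2).reverse
        (row, k, d) a
        = (PySem.List.pySetD row a ((pv_nearest_point a (done.length : Int) pts).getD "!"), k',
           d.modify ((pv_nearest_point a (done.length : Int) pts).getD "!") 0 (· + 1)) := by
      simp only [pvBStep, ← hk', hlbl]
    rw [hstepA, hstepB, show a + ((cnt + 1 : Nat) : Int) = (a + 1) + (cnt : Nat) from by
      push_cast; omega]
    exact ih (a + 1) _ k' _ h2 (fun i h hik => by
      have := hall i h hik; omega)

theorem search_points_outer_eq (pts pts2 : List (Int × Int × String)) (hne : pts2 ≠ [])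
    (hc : ∀ x y, pv_nearest_point x y pts = pv_label x y pts2) :
    ∀ (rest done : List (List String)) (d : PySem.Dict String Int),
      (PySem.List.pyRange (done.length : Int) ((done.length : Int) + rest.length)).foldl
          (pvAOuter pts) (done ++ rest, d)
        = (PySem.List.enumerate rest (done.length : Int)).foldl
            (pvBRow (PySem.List.sorted pts2 (fun p => p.1))) (done, d) := by
  intro rest
  induction rest with
  | nil =>
    intro done d
    rw [PySem.List.pyRange_one_eq_nil (by simp)]
    simp [PySem.List.enumerate]
  | cons r rest ih =>
    intro done d
    set spts := PySem.List.sorted pts2 (fun p => p.1) with hspts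
    set L := (pv_scan (fun p => |(done.length : Int) - p.2.1| - p.1) spts).2 with hL
    set R := ((pv_scan (fun p => |(done.length : Int) - p.2.1| + p.1) spts.reverse).2).reverse with hR
    set RD := (PySem.List.pyRange 0 (r.length : Int)).foldl (pvBStep spts L R) (r, 0, d) with hRD
    rw [PySem.List.pyRange_one_cons (by simp)]
    simp only [List.foldl_cons]
    have hA : pvAOuter pts (done ++ r :: rest, d) (done.length : Int)
        = (done ++ RD.1 :: rest, RD.2.2) := by
      unfold pvAOuter
      rw [pv_getD_mid]
      have := search_points_inner_eq pts pts2 hne hc done rest r.length 0 r 0 d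
        (by omega) (by intro i h hik; omega)
      rw [show ((0 : Int) + (r.length : Nat)) = ((r.length : Nat) : Int) from by omega] at this
      exact this
    rw [hA]
    have hrw : done ++ RD.1 :: rest = (done ++ [RD.1]) ++ rest := by simp
    have hlen : ((done.length : Int) + 1) = (((done ++ [RD.1]).length : Int)) := by simp
    have hlen2 : ((done.length : Int) + ((r :: rest).length : Int))
        = (((done ++ [RD.1]).length : Int) + (rest.length : Int)) := by
      simp; omega
    rw [hrw, hlen2, hlen, ih]
    simp only [PySem.List.enumerate, List.foldl_cons]
    rw [show pvBRow spts (done, d) ((done.length : Int), r) = (done ++ [RD.1], RD.2.2) from by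
          simp [pvBRow, hRD, ← hL, ← hR], ← hlen]

theorem search_points_outer_empty_A (pts : List (Int × Int × String)) :
    ∀ (rest done : List (List String)) (d : PySem.Dict String Int),
      (∀ row ∈ rest, row = []) →
      (PySem.List.pyRange (done.length : Int) ((done.length : Int) + rest.length)).foldl
          (pvAOuter pts) (done ++ rest, d) = (done ++ rest, d) := by
  intro rest
  induction rest with
  | nil =>
    intro done d _
    rw [PySem.List.pyRange_one_eq_nil (by simp)]
    rfl
  | cons r rest ih =>
    intro done d h
    have hr : r = [] := h r (by simp)
    rw [PySem.List.pyRange_one_cons (by simp)]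
    simp only [List.foldl_cons]
    have hA : pvAOuter pts (done ++ r :: rest, d) (done.length : Int) = (done ++ r :: rest, d) := by
      unfold pvAOuter
      rw [pv_getD_mid, hr]
      rfl
    rw [hA]
    have hrw : done ++ r :: rest = (done ++ [r]) ++ rest := by simp
    have hlen : ((done.length : Int) + 1) = (((done ++ [r]).length : Int)) := by simp
    have hlen2 : ((done.length : Int) + ((r :: rest).length : Int))
        = (((done ++ [r]).length : Int) + (rest.length : Int)) := by simp; omega
    rw [hrw, hlen2, hlen, ih (done ++ [r]) d (fun row hm => h row (by simp [hm]))]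

theorem search_points_outer_empty_B (spts : List (Int × Int × String)) :
    ∀ (rest : List (List String)) (s : Int) (done : List (List String)) (d : PySem.Dict String Int),
      (∀ row ∈ rest, row = []) →
      (PySem.List.enumerate rest s).foldl (pvBRow spts) (done, d) = (done ++ rest, d) := by
  intro rest
  induction rest with
  | nil => intro s done d _; simp [PySem.List.enumerate]
  | cons r rest ih =>
    intro s done d h
    have hr : r = [] := h r (by simp)
    simp only [PySem.List.enumerate, List.foldl_cons]
    have hB : pvBRow spts (done, d) (s, r) = (done ++ [r], d) := by
      subst hr
      unfold pvBRow
      rw [show ((List.length ([] : List String) : Int)) = (0 : Int) from by simp,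
          PySem.List.pyRange_one_eq_nil (by omega)]
      rfl
    rw [hB, ih (s + 1) (done ++ [r]) d (fun row hm => h row (by simp [hm]))]
    simp

theorem search_points_spec' : ∀ (canvas : List (List String)) (pts : List (Int × Int × String)),
    Pre_search_points canvas pts → search_points canvas pts = search_points_alt canvas pts := by
  intro canvas pts hpre
  simp only [search_points, search_points_alt]
  rcases hpre with hempty | h2
  · have hA := search_points_outer_empty_A pts canvas []
      ((pts.foldl (fun d k => d.insert k.2.2 (0 : Int)) PySem.Dict.empty).insert "*" 0) hempty
    have hB := search_points_outer_empty_B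
      (PySem.List.sorted (pv_dedup_points pts) (fun p => p.1)) canvas 0 []
      ((pts.foldl (fun d k => d.insert k.2.2 (0 : Int)) PySem.Dict.empty).insert "*" 0) hempty
    simp only [List.nil_append, List.length_nil, Nat.cast_zero, zero_add] at hA hB
    rw [hA, hB]
  · have hne : pv_dedup_points pts ≠ [] := by
      intro he
      have := pv_dedup_length pts
      rw [he] at this
      simp at this
      omega
    have hc := fun x y => search_points_cell_eq pts h2 x y
    have h := search_points_outer_eq pts (pv_dedup_points pts) hne hc canvas []
      ((pts.foldl (fun d k => d.insert k.2.2 (0 : Int)) PySem.Dict.empty).insert "*" 0)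
    simp only [List.length_nil, Nat.cast_zero, zero_add, List.nil_append] at h
    rw [h]

-- ===== VERDICT (by name: the statement is the Claim_ definition above) =====
theorem search_points_spec : Claim_equal_search_points := by
  intro canvas pts _ hpre
  exact search_points_spec' canvas pts hpre
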